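-- pv_equiv track=rewrite | github.com/mosour23/lexiai-spelling-corrector | tests/test_utilities.py | with_errors
-- ===== SOURCE A (Python) =====
-- def with_errors(base_text: str, error_count: int) -> str:
--     """
--     Generate text with intentional errors.
--
--     Typical: inject typos by removing/changing characters.
--     """
--     words = base_text.split()
--     errors_made = 0
--
--     for i, word in enumerate(words):
--         if errors_made >= error_count:
--             break
--         if len(word) > 2:
--             # Simple typo: swap adjacent characters
--             chars = list(word)
--             idx = len(chars) // 2
--             chars[idx], chars[idx + 1] = chars[idx + 1], chars[idx]
--             words[i] = ''.join(chars)
--             errors_made += 1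
--
--     return ' '.join(words)
-- ===== SOURCE B (Python) =====
-- def with_errors(base_text: str, error_count: int) -> str:
--     """Generate text with intentional errors (mid-word adjacent-char swap),
--     via a single character-level scan instead of split/join over a word list."""
--     out = []
--     budget = error_count
--     word = []
--     for c in base_text + ' ':  # sentinel space flushes the last word
--         if c.isspace():
--             if word:
--                 if budget > 0 and len(word) > 2:
--                     m = len(word) // 2
--                     word[m], word[m + 1] = word[m + 1], word[m]
--                     budget -= 1
--                 if out:
--                     out.append(' ')
--                 out.extend(word)
--                 word = []
--         else:
--             word.append(c)
--     return ''.join(out)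
-- ===== Notes on version B (the rewrite author's own statement) =====
-- stated objective: alternative
-- what changed: A splits into a word list and walks it with a mutable errors_made counter, rewriting list cells and re-joining; B never builds a word list: it streams over the characters once (with a sentinel trailing space), accumulating the current word and flushing it to the output buffer at each whitespace boundary, swapping its two middle characters while the budget lasts.
import Mathlib
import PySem

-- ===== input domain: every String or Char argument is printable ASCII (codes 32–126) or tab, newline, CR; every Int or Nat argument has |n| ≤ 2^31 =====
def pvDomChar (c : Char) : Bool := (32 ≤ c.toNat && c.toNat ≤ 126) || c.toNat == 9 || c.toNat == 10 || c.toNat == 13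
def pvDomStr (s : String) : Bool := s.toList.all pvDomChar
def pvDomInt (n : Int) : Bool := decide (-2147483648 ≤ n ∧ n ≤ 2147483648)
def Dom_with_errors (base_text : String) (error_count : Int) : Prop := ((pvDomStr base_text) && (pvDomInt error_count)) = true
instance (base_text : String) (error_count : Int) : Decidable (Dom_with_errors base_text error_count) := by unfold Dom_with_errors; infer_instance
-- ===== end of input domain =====

-- B replaces A's split-into-a-word-list + mutable errors_made counter + re-join by one
-- character-level scan: it accumulates the current word char by char and flushes it at each
-- whitespace boundary (sentinel trailing space), swapping its two middle characters while the
-- budget lasts; same cost, genuinely different traversal (objective: alternative).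

-- ===== PORT A =====
-- chars = list(word); idx = len(chars)//2; chars[idx], chars[idx+1] = chars[idx+1], chars[idx]; ''.join(chars)
-- (indices idx and idx+1 are in range at the only call site, where len(word) > 2,
--  so the total forms pyGetD/pySetD coincide with Python's indexing here)
def pvSwapA (w : String) : String :=
  let chars := w.toList
  let idx : Int := PySem.Int.floordiv (chars.length : Int) 2
  let a := PySem.List.pyGetD chars idx ' '
  let b := PySem.List.pyGetD chars (idx + 1) ' '
  String.ofList (PySem.List.pySetD (PySem.List.pySetD chars idx b) (idx + 1) a)

-- the for-loop over enumerate(words) with errors_made and break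
def pvGoA : List String → Int → Int → List String
  | [], _, _ => []
  | w :: rest, ec, em =>
    if em ≥ ec then w :: rest
    else if PySem.Str.len w > 2 then pvSwapA w :: pvGoA rest ec (em + 1)
    else w :: pvGoA rest ec em

def with_errors (base_text : String) (error_count : Int) : String :=
  PySem.Str.join " " (pvGoA (PySem.Str.split₀ base_text) error_count 0)

-- ===== PORT B =====
-- word[m], word[m+1] = word[m+1], word[m]  (both indices in range at the only call site,
-- where len(word) > 2, so the total forms pyGetD/pySetD coincide with Python's indexing)
def pvMidSwap (word : List Char) : List Char :=
  let m : Int := PySem.Int.floordiv (word.length : Int) 2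
  let a := PySem.List.pyGetD word (m + 1) ' '
  let b := PySem.List.pyGetD word m ' '
  PySem.List.pySetD (PySem.List.pySetD word m a) (m + 1) b

-- one step of the for-loop body of Source B; state = (out, budget, word)
def pvStepB (st : List Char × Int × List Char) (c : Char) : List Char × Int × List Char :=
  let out := st.1
  let budget := st.2.1
  let word := st.2.2
  if PySem.Chars.isspace c then
    if word.isEmpty then st
    else
      let word' := if budget > 0 ∧ 2 < word.length then pvMidSwap word else word
      let budget' := if budget > 0 ∧ 2 < word.length then budget - 1 else budget
      ((out ++ (if out.isEmpty then [] else [' '])) ++ word', budget', [])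
  else (out, budget, word ++ [c])

-- for c in base_text + ' ': …   then ''.join(out)
def with_errors_alt (base_text : String) (error_count : Int) : String :=
  String.ofList (((base_text.toList ++ [' ']).foldl pvStepB ([], error_count, [])).1)

-- ===== PRECONDITION & SPEC =====
def Spec_with_errors (base_text : String) (error_count : Int) (out : String) : Prop := out = with_errors_alt base_text error_count
instance (base_text : String) (error_count : Int) (out : String) : Decidable (Spec_with_errors base_text error_count out) := by unfold Spec_with_errors; infer_instance

-- ===== CLAIM (what is proved, stated in full; the proofs are below) =====
def Claim_equal_with_errors : Prop := ∀ (base_text : String) (error_count : Int), Dom_with_errors base_text error_count → Spec_with_errors base_text error_count (with_errors base_text error_count)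

-- ===== LEMMAS AND PROOFS =====

-- what B does to one word at a flush, and the budget left afterwards
def pvFix (b : Int) (w : List Char) : List Char := if b > 0 ∧ 2 < w.length then pvMidSwap w else w
def pvDec (b : Int) (w : List Char) : Int := if b > 0 ∧ 2 < w.length then b - 1 else b

-- B's output buffer after flushing a whole word list
def pvFlush (out : List Char) (b : Int) : List (List Char) → List Char
  | [] => out
  | w :: ws => pvFlush ((out ++ (if out.isEmpty then [] else [' '])) ++ pvFix b w) (pvDec b w) ws

-- A's loop restated at char level with a remaining budget instead of (ec, em)
def pvGoC : List (List Char) → Int → List (List Char)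
  | [], _ => []
  | w :: ws, b => pvFix b w :: pvGoC ws (pvDec b w)

lemma pvMidSwap_length (w : List Char) : (pvMidSwap w).length = w.length := by
  simp [pvMidSwap, PySem.List.length_pySetD]

lemma pvGoAccRev (cs : List Char) : ∀ (cur : List Char) (acc : List (List Char)),
    PySem.Chars.split₀.go cs cur acc = acc.reverse ++ PySem.Chars.split₀.go cs cur [] := by
  induction cs with
  | nil =>
      intro cur acc
      simp only [PySem.Chars.split₀.go]
      split_ifs <;> simp
  | cons c rest ih =>
      intro cur acc
      simp only [PySem.Chars.split₀.go]
      split_ifs with h1 h2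
      · exact ih [] acc
      · rw [ih [] (cur.reverse :: acc), ih [] [cur.reverse]]; simp
      · exact ih (c :: cur) acc

lemma pvGoNe (cs : List Char) : ∀ (cur : List Char) (acc : List (List Char)),
    (∀ w ∈ acc, w ≠ []) → ∀ w ∈ PySem.Chars.split₀.go cs cur acc, w ≠ [] := by
  induction cs with
  | nil =>
      intro cur acc hacc w hw
      simp only [PySem.Chars.split₀.go] at hw
      split_ifs at hw with h
      · exact hacc w (List.mem_reverse.1 hw)
      · rcases List.mem_cons.1 (List.mem_reverse.1 hw) with h' | h'
        · subst h'; simp [List.isEmpty_iff] at h; simp [h]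
        · exact hacc w h'
  | cons c rest ih =>
      intro cur acc hacc w hw
      simp only [PySem.Chars.split₀.go] at hw
      split_ifs at hw with h1 h2
      · exact ih [] acc hacc w hw
      · refine ih [] (cur.reverse :: acc) ?_ w hw
        intro v hv
        rcases List.mem_cons.1 hv with hv | hv
        · simp [List.isEmpty_iff] at h2; simp [hv, h2]
        · exact hacc v hv
      · exact ih (c :: cur) acc hacc w hw

-- the key streaming invariant: folding B's step over cs ++ [' '] from (out, b, word)
-- flushes exactly the words split₀ finds in cs, continuing the current word
lemma pvFoldB (cs : List Char) : ∀ (word out : List Char) (b : Int),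
    (((cs ++ [' ']).foldl pvStepB (out, b, word)).1)
      = pvFlush out b (PySem.Chars.split₀.go cs word.reverse []) := by
  induction cs with
  | nil =>
      intro word out b
      simp only [List.nil_append, List.foldl_cons, List.foldl_nil]
      simp only [PySem.Chars.split₀.go]
      cases word with
      | nil => simp [pvStepB, PySem.Chars.isspace, pvFlush]
      | cons x xs =>
          have hsp : PySem.Chars.isspace ' ' = true := by decide
          simp [pvStepB, hsp, pvFlush, pvFix]
  | cons c rest ih =>
      intro word out b
      simp only [List.cons_append, List.foldl_cons]
      simp only [PySem.Chars.split₀.go]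
      by_cases hsp : PySem.Chars.isspace c
      · cases word with
        | nil =>
            simpa [pvStepB, hsp] using ih [] out b
        | cons x xs =>
            rw [if_pos hsp]
            rw [if_neg (by simp)]
            rw [pvGoAccRev rest [] [(x :: xs).reverse.reverse]]
            simp only [List.reverse_reverse, List.reverse_singleton]
            have : pvFlush out b ((x :: xs) :: PySem.Chars.split₀.go rest [] []) =
                pvFlush ((out ++ (if out.isEmpty then [] else [' '])) ++ pvFix b (x :: xs))
                  (pvDec b (x :: xs)) (PySem.Chars.split₀.go rest [] []) := rfl
            rw [List.singleton_append, this]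
            have hih := ih [] ((out ++ (if out.isEmpty then [] else [' '])) ++ pvFix b (x :: xs))
              (pvDec b (x :: xs))
            simp only [List.reverse_nil] at hih
            rw [← hih]
            simp [pvStepB, hsp, pvFix, pvDec]
      · rw [if_neg hsp]
        have : pvStepB (out, b, word) c = (out, b, word ++ [c]) := by
          simp [pvStepB, hsp]
        rw [this, ih (word ++ [c]) out b]
        simp

lemma pvGoC_of_nonpos (ws : List (List Char)) : ∀ b : Int, b ≤ 0 → pvGoC ws b = ws := by
  induction ws with
  | nil => intro b _; rfl
  | cons w ws ih =>
      intro b hb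
      simp only [pvGoC, pvFix, pvDec]
      rw [if_neg (by omega), if_neg (by omega), ih b hb]

lemma pvFix_ne_nil (b : Int) (w : List Char) (h : w ≠ []) : pvFix b w ≠ [] := by
  simp only [pvFix]
  split_ifs with hc
  · intro hnil
    have hl := pvMidSwap_length w
    rw [hnil] at hl
    exact h (List.eq_nil_of_length_eq_zero hl.symm)
  · exact h

lemma pvFlush_eq (ws : List (List Char)) : ∀ (out : List Char) (b : Int),
    (∀ w ∈ ws, w ≠ []) →
    pvFlush out b ws
      = (out ++ (if ws.isEmpty || out.isEmpty then [] else [' ']))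
          ++ PySem.Chars.join [' '] (pvGoC ws b) := by
  induction ws with
  | nil => intro out b _; simp [pvFlush, pvGoC, PySem.Chars.join_nil]
  | cons w ws ih =>
      intro out b hne
      have hw : w ≠ [] := hne w (by simp)
      have hfix : pvFix b w ≠ [] := pvFix_ne_nil b w hw
      simp only [pvFlush]
      rw [ih _ (pvDec b w) (fun v hv => hne v (by simp [hv]))]
      have hout' : (((out ++ (if out.isEmpty then [] else [' '])) ++ pvFix b w).isEmpty) = false := by
        simp [List.isEmpty_iff, hfix]
      rw [hout']
      simp only [pvGoC]
      cases hws : ws with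
      | nil =>
          simp [PySem.Chars.join_singleton, PySem.Chars.join_nil, pvGoC]
      | cons w2 ws2 =>
          have h2 : pvGoC (w2 :: ws2) (pvDec b w) = pvFix (pvDec b w) w2 :: pvGoC ws2 (pvDec (pvDec b w) w2) := rfl
          rw [h2, PySem.Chars.join_cons_cons]
          simp [List.append_assoc]

lemma pvGoA_eq (cws : List (List Char)) : ∀ ec em : Int,
    pvGoA (cws.map String.ofList) ec em = (pvGoC cws (ec - em)).map String.ofList := by
  induction cws with
  | nil => intro ec em; rfl
  | cons w ws ih =>
      intro ec em
      by_cases hstop : em ≥ ec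
      · rw [pvGoC_of_nonpos _ (ec - em) (by omega)]
        simp [pvGoA, hstop]
      · have hb : 0 < ec - em := by omega
        have hlen : (PySem.Str.len (String.ofList w) > 2) ↔ (2 < w.length) := by
          simp [PySem.Str.len]
        by_cases hw : 2 < w.length
        · simp only [List.map_cons, pvGoA, if_neg hstop, if_pos (hlen.2 hw), pvGoC, pvFix, pvDec,
            if_pos (And.intro hb hw)]
          rw [ih ec (em + 1)]
          have hsub : ec - (em + 1) = ec - em - 1 := by omega
          rw [hsub]
          have hswap : pvSwapA (String.ofList w) = String.ofList (pvMidSwap w) := by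
            simp [pvSwapA, pvMidSwap]
          rw [hswap]
        · have hnot : ¬ (0 < ec - em ∧ 2 < w.length) := fun hcon => hw hcon.2
          simp only [List.map_cons, pvGoA, if_neg hstop, if_neg (fun h => hw (hlen.1 h)), pvGoC,
            pvFix, pvDec, if_neg hnot]
          rw [ih ec em]

-- ===== VERDICT (by name: the statement is the Claim_ definition above) =====
theorem with_errors_spec : Claim_equal_with_errors := by
  intro s ec _
  unfold Spec_with_errors
  have hsplit : PySem.Str.split₀ s = (PySem.Chars.split₀ s.toList).map String.ofList := rfl
  have hA : with_errors s ec
      = String.ofList (PySem.Chars.join [' '] (pvGoC (PySem.Chars.split₀ s.toList) ec)) := by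
    simp only [with_errors, hsplit]
    rw [pvGoA_eq]
    have : ec - 0 = ec := by omega
    rw [this]
    simp only [PySem.Str.join]
    have h1 : (" ".toList : List Char) = [' '] := by decide
    have h2 : List.map String.toList (List.map String.ofList (pvGoC (PySem.Chars.split₀ s.toList) ec))
        = pvGoC (PySem.Chars.split₀ s.toList) ec := by
      simp [List.map_map, Function.comp_def]
    rw [h1, h2]
  have hB : with_errors_alt s ec
      = String.ofList (pvFlush [] ec (PySem.Chars.split₀ s.toList)) := by
    simp only [with_errors_alt]
    have := pvFoldB s.toList [] [] ec
    simp only [List.reverse_nil] at this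
    rw [this]
    rfl
  have hne' : ∀ w ∈ PySem.Chars.split₀ s.toList, w ≠ [] := pvGoNe s.toList [] [] (by simp)
  rw [hA, hB, pvFlush_eq _ _ _ hne']
  simp
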